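-- pv_equiv track=rewrite | github.com/yunho-c/charsiug2p-tvm | python/src/charsiug2p_tvm/tvm_runtime.py | _pick_batch_size
-- ===== SOURCE A (Python) =====
-- from typing import Iterable, Sequence
--
-- def _pick_batch_size(available: Sequence[int], needed: int) -> int:
--     if not available:
--         raise ValueError("No batch sizes provided.")
--     sizes = sorted(set(available))
--     if sizes[0] <= 0:
--         raise ValueError(f"Invalid batch size: {sizes[0]}.")
--     if needed <= sizes[0]:
--         return sizes[0]
--     for size in sizes:
--         if size >= needed:
--             return size
--     return sizes[-1]
-- ===== SOURCE B (Python) =====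
-- def _pick_batch_size(available, needed):
--     uniq = set(available)
--     if not uniq:
--         raise ValueError("No batch sizes provided.")
--     lo = min(uniq)
--     if lo <= 0:
--         raise ValueError(f"Invalid batch size: {lo}.")
--     candidates = [s for s in uniq if s >= needed]
--     return min(candidates) if candidates else max(uniq)
-- ===== Notes on version B (the rewrite author's own statement) =====
-- stated objective: simpler
-- what changed: Drops the sort entirely: B uses direct min/max scans over the deduplicated set (min for the validity check, min over the >= needed candidates, max as the fallback) instead of sorting and linearly scanning the sorted list.
import Mathlib
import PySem

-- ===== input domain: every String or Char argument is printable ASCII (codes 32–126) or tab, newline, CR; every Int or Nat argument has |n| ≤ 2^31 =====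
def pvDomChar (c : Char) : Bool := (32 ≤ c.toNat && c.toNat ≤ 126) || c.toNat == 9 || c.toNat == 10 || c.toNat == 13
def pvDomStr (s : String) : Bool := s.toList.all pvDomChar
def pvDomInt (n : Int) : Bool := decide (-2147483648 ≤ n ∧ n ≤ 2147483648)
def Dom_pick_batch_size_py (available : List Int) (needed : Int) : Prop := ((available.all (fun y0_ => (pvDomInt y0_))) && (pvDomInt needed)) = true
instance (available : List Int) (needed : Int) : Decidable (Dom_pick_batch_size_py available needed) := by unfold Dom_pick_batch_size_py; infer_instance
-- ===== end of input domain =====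

-- B replaces sort-then-scan with direct min/max scans over the deduplicated set (simpler).

-- ===== PORT A =====
-- the 'for size in sizes: if size >= needed: return size' loop, falling through to sizes[-1]
def pickLoopA (needed last : Int) : List Int → Int
  | [] => last
  | s :: rest => if needed ≤ s then s else pickLoopA needed last rest

def pick_batch_size_py (available : List Int) (needed : Int) : Int :=
  if available.isEmpty then 0  -- A raises ValueError "No batch sizes provided." (outside Pre_)
  else
    let sizes := PySem.List.sorted (PySem.Set.ofList available) (fun x => x) false
    let s0 := sizes.headD 0
    if s0 ≤ 0 then 0  -- A raises ValueError "Invalid batch size: …" (outside Pre_)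
    else if needed ≤ s0 then s0
    else pickLoopA needed (sizes.getLastD 0) sizes

-- ===== PORT B =====
def pick_batch_size_py_alt (available : List Int) (needed : Int) : Int :=
  let uniq := PySem.Set.ofList available
  if uniq.isEmpty then 0  -- B raises ValueError "No batch sizes provided." (outside Pre_)
  else
    let lo := (PySem.List.min? uniq (fun x => x)).getD 0
    if lo ≤ 0 then 0  -- B raises ValueError "Invalid batch size: …" (outside Pre_)
    else
      let candidates := uniq.filter (fun s => needed ≤ s)
      match PySem.List.min? candidates (fun x => x) with
      | some m => m
      | none => (PySem.List.max? uniq (fun x => x)).getD 0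

-- ===== PRECONDITION & SPEC =====
-- Pre_ excludes exactly the inputs where both Pythons raise ValueError:
-- an empty list, or a list whose minimum is ≤ 0 (i.e. containing a non-positive size).
def Pre_pick_batch_size_py (available : List Int) (needed : Int) : Prop :=
  available ≠ [] ∧ (available.all (fun x => decide (0 < x))) = true
instance (available : List Int) (needed : Int) : Decidable (Pre_pick_batch_size_py available needed) := by unfold Pre_pick_batch_size_py; infer_instance

def pvWitness_pick_batch_size_py : List Int × Int := ([8, 2, 4], 3)

def Spec_pick_batch_size_py (available : List Int) (needed : Int) (out : Int) : Prop := out = pick_batch_size_py_alt available needed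
instance (available : List Int) (needed : Int) (out : Int) : Decidable (Spec_pick_batch_size_py available needed out) := by unfold Spec_pick_batch_size_py; infer_instance

-- ===== CLAIM (what is proved, stated in full; the proofs are below) =====
def Claim_equal_pick_batch_size_py : Prop := ∀ (available : List Int) (needed : Int), Dom_pick_batch_size_py available needed → Pre_pick_batch_size_py available needed → Spec_pick_batch_size_py available needed (pick_batch_size_py available needed)

-- ===== LEMMAS AND PROOFS =====

-- the loop is 'first element ≥ needed, else last'
theorem pickLoopA_eq_find (needed last : Int) (s : List Int) :
    pickLoopA needed last s = ((s.find? (fun x => decide (needed ≤ x))).getD last) := by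
  induction s with
  | nil => rfl
  | cons a t ih =>
    simp only [pickLoopA, List.find?]
    by_cases h : needed ≤ a <;> simp [h, ih]

-- on a (≤)-sorted list, find? of '≥ needed' returns a minimum of the matching elements
theorem find?_sorted_min (needed : Int) (s : List Int) (hs : s.Pairwise (· ≤ ·)) (x : Int)
    (hx : s.find? (fun y => decide (needed ≤ y)) = some x) :
    needed ≤ x ∧ x ∈ s ∧ ∀ y ∈ s, needed ≤ y → x ≤ y := by
  induction s with
  | nil => simp at hx
  | cons a t ih =>
    rw [List.find?_cons] at hx
    by_cases h : needed ≤ a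
    · simp [h] at hx
      subst hx
      refine ⟨h, List.mem_cons_self, ?_⟩
      intro y hy _
      rcases List.mem_cons.mp hy with rfl | hyt
      · exact le_refl _
      · exact (List.pairwise_cons.mp hs).1 y hyt
    · simp [h] at hx
      obtain ⟨h1, h2, h3⟩ := ih (List.pairwise_cons.mp hs).2 hx
      refine ⟨h1, List.mem_cons_of_mem _ h2, ?_⟩
      intro y hy hny
      rcases List.mem_cons.mp hy with rfl | hyt
      · exact absurd hny h
      · exact h3 y hyt hny

-- getLastD of a nonempty list is a member
theorem getLastD_mem (s : List Int) (hne : s ≠ []) : s.getLastD 0 ∈ s := by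
  induction s with
  | nil => exact absurd rfl hne
  | cons a t ih =>
    cases t with
    | nil => simp
    | cons b u => simpa using Or.inr (ih (by simp))

-- any member of a (≤)-sorted nonempty list is ≤ its last element
theorem pairwise_le_getLastD (s : List Int) (hs : s.Pairwise (· ≤ ·)) (x : Int) (hx : x ∈ s) :
    x ≤ s.getLastD 0 := by
  induction s with
  | nil => simp at hx
  | cons a t ih =>
    obtain ⟨ha, ht⟩ := List.pairwise_cons.mp hs
    rcases List.mem_cons.mp hx with rfl | hxt
    · cases t with
      | nil => simp
      | cons b u =>
        have hmem : (b :: u).getLastD 0 ∈ b :: u := getLastD_mem _ (by simp)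
        simpa using ha _ hmem
    · cases t with
      | nil => simp at hxt
      | cons b u => simpa using ih ht hxt

-- ===== VERDICT (by name: the statement is the Claim_ definition above) =====
theorem pick_batch_size_py_spec : Claim_equal_pick_batch_size_py := by
  intro available needed _ hpre
  obtain ⟨hne, hall⟩ := hpre
  have hpos : ∀ x ∈ available, (0:Int) < x := by
    intro x hx
    have := List.all_eq_true.mp hall x hx
    simpa using this
  have hposu : ∀ x ∈ PySem.Set.ofList available, (0:Int) < x := by
    intro x hx
    exact hpos x ((PySem.Set.mem_ofList _ _).mp hx)
  have huneq : PySem.Set.ofList available ≠ [] := by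
    obtain ⟨a, t, rfl⟩ := List.exists_cons_of_ne_nil hne
    intro h
    have : a ∈ PySem.Set.ofList (a :: t) := (PySem.Set.mem_ofList _ _).mpr (by simp)
    simp [h] at this
  have hEmpty : available.isEmpty = false := by simpa [List.isEmpty_iff] using hne
  have hUEmpty : (PySem.Set.ofList available).isEmpty = false := by
    simpa [List.isEmpty_iff] using huneq
  unfold Spec_pick_batch_size_py pick_batch_size_py pick_batch_size_py_alt
  simp only [hEmpty, hUEmpty, Bool.false_eq_true, if_false]
  -- name the sorted list and its head
  obtain ⟨s0, t, hs⟩ := List.exists_cons_of_ne_nil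
    (l := PySem.List.sorted (PySem.Set.ofList available) (fun x => x) false)
    (by
      intro h
      exact huneq ((PySem.List.sorted_eq_nil_iff _ _ _).mp h))
  have hs0mem : s0 ∈ PySem.Set.ofList available := by
    have : s0 ∈ PySem.List.sorted (PySem.Set.ofList available) (fun x => x) false := by
      rw [hs]; exact List.mem_cons_self
    exact (PySem.List.mem_sorted _ _ _ _).mp this
  have hs0min : ∀ y ∈ PySem.Set.ofList available, s0 ≤ y :=
    PySem.List.key_head_sorted_le _ _ hs
  have hs0pos : (0:Int) < s0 := hposu s0 hs0mem
  -- B's lo is s0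
  have hlo : PySem.List.min? (PySem.Set.ofList available) (fun x => x) = some s0 := by
    cases hm : PySem.List.min? (PySem.Set.ofList available) (fun x => x) with
    | none => exact absurd ((PySem.List.min?_eq_none_iff _ _).mp hm) huneq
    | some m =>
      have hmmem := PySem.List.min?_mem hm
      have hmmin := PySem.List.min?_isMin hm
      have h1 : s0 ≤ m := hs0min m hmmem
      have h2 : m ≤ s0 := hmmin s0 hs0mem
      rw [le_antisymm h2 h1]
  rw [hs, hlo]
  simp only [List.headD_cons, Option.getD_some]
  have hs0le : ¬ s0 ≤ 0 := not_le.mpr hs0pos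
  rw [if_neg hs0le, if_neg hs0le]
  have hpair : (s0 :: t).Pairwise (fun a b : Int => a ≤ b) := by
    have := PySem.List.sorted_pairwise (xs := PySem.Set.ofList available)
      (key := fun x : Int => x)
    rw [hs] at this
    simpa using this
  have hmemS : ∀ x : Int, x ∈ s0 :: t ↔ x ∈ PySem.Set.ofList available := by
    intro x
    rw [← hs]
    exact PySem.List.mem_sorted _ _ _ _
  by_cases hn : needed ≤ s0
  · rw [if_pos hn]
    -- candidates contain s0; min of candidates is s0
    have hs0c : s0 ∈ (PySem.Set.ofList available).filter (fun s => decide (needed ≤ s)) :=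
      List.mem_filter.mpr ⟨hs0mem, by simpa using hn⟩
    cases hm : PySem.List.min? ((PySem.Set.ofList available).filter (fun s => decide (needed ≤ s))) (fun x => x) with
    | none =>
      have := (PySem.List.min?_eq_none_iff _ _).mp hm
      rw [this] at hs0c
      simp at hs0c
    | some m =>
      have hmmem := PySem.List.min?_mem hm
      have hmmin := PySem.List.min?_isMin hm
      have h1 : s0 ≤ m := hs0min m (List.mem_filter.mp hmmem).1
      have h2 : m ≤ s0 := hmmin s0 hs0c
      rw [le_antisymm h2 h1]
  · rw [if_neg hn]
    rw [pickLoopA_eq_find]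
    cases hf : (s0 :: t).find? (fun x => decide (needed ≤ x)) with
    | some x =>
      obtain ⟨hx1, hx2, hx3⟩ := find?_sorted_min needed (s0 :: t) hpair x hf
      have hxc : x ∈ (PySem.Set.ofList available).filter (fun s => decide (needed ≤ s)) :=
        List.mem_filter.mpr ⟨(hmemS x).mp hx2, by simpa using hx1⟩
      cases hm : PySem.List.min? ((PySem.Set.ofList available).filter (fun s => decide (needed ≤ s))) (fun x => x) with
      | none =>
        have := (PySem.List.min?_eq_none_iff _ _).mp hm
        rw [this] at hxc
        simp at hxc
      | some m =>
        have hmmem := List.mem_filter.mp (PySem.List.min?_mem hm)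
        have hmmin := PySem.List.min?_isMin hm
        have h1 : x ≤ m := hx3 m ((hmemS m).mpr hmmem.1) (by simpa using hmmem.2)
        have h2 : m ≤ x := hmmin x hxc
        simp [le_antisymm h2 h1]
    | none =>
      have hnone : ∀ y ∈ s0 :: t, ¬ needed ≤ y := by
        intro y hy
        have := List.find?_eq_none.mp hf y hy
        simpa using this
      have hcand : (PySem.Set.ofList available).filter (fun s => decide (needed ≤ s)) = [] := by
        rw [List.filter_eq_nil_iff]
        intro y hy
        simpa using hnone y ((hmemS y).mpr hy)
      rw [hcand]
      have hminnil : PySem.List.min? ([] : List Int) (fun x => x) = none :=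
        (PySem.List.min?_eq_none_iff _ _).mpr rfl
      rw [hminnil]
      -- A's last element equals B's max
      cases hM : PySem.List.max? (PySem.Set.ofList available) (fun x => x) with
      | none => exact absurd ((PySem.List.max?_eq_none_iff _ _).mp hM) huneq
      | some M =>
        have hMmem := PySem.List.max?_mem hM
        have hMmax := PySem.List.max?_isMax hM
        have hLmem : (s0 :: t).getLastD 0 ∈ s0 :: t := getLastD_mem _ (by simp)
        have h1 : (s0 :: t).getLastD 0 ≤ M := hMmax _ ((hmemS _).mp hLmem)
        have h2 : M ≤ (s0 :: t).getLastD 0 :=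
          pairwise_le_getLastD _ hpair M ((hmemS M).mpr hMmem)
        have heq : (s0 :: t).getLastD 0 = M := le_antisymm h1 h2
        simpa [List.getLastD_eq_getLast?] using heq
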